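-- pv_equiv track=rewrite | github.com/Kawser-nerd/CLCDSA | Source Codes/CodeJamData/09/02/11.py | solve_case
-- ===== SOURCE A (Python) =====
-- def solve_case(case):
--     symbols = list(reversed("abcdefghijklmnopqrstuvwxyz"))
--     H, W, altitudes = case
--     labels = [[None] * W for i in range(H)]
--     for i0 in range(H):
--         for j0 in range(W):
--             i, j = i0, j0
--             path = []
--             while True:
--                 if labels[i][j]:
--                     symb = labels[i][j]
--                     break
--                 path.append((i, j))
--                 neighbours = set()
--                 for di, dj in (-1, 0), (0, -1), (0, 1), (1, 0):
--                     if 0 <= i + di < H and 0 <= j + dj < W and altitudes[i + di][j + dj] < altitudes[i][j]: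
--                         neighbours.add((i + di, j + dj))
--                 if not neighbours:
--                     symb = symbols.pop()
--                     break
--                 else:
--                     i, j = min(neighbours, key=lambda p: (altitudes[p[0]][p[1]], p[0], p[1]))
--             for i, j in path:
--                 labels[i][j] = symb
--     return labels
-- ===== SOURCE B (Python) =====
-- def solve_case(case):
--     H, W, altitudes = case
--
--     def parent(i, j):
--         best = None
--         for di, dj in ((-1, 0), (0, -1), (0, 1), (1, 0)):
--             ni, nj = i + di, j + dj
--             if 0 <= ni < H and 0 <= nj < W and altitudes[ni][nj] < altitudes[i][j]:
--                 if best is None or (altitudes[ni][nj], ni, nj) < (altitudes[best[0]][best[1]], best[0], best[1]):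
--                     best = (ni, nj)
--         return best
--
--     # Process cells from the lowest altitude up: when a cell is reached, its strictly
--     # lower parent has already been assigned a basin root, so each cell's root is a
--     # single dictionary lookup -- no descent walk anywhere.
--     cells = sorted(((i, j) for i in range(H) for j in range(W)),
--                    key=lambda c: altitudes[c[0]][c[1]])
--     root = {}
--     for c in cells:
--         p = parent(*c)
--         root[c] = c if p is None else root[p]
--
--     letters = "abcdefghijklmnopqrstuvwxyz"
--     assigned = {}
--     labels = []
--     for i in range(H):
--         row = []
--         for j in range(W):
--             r = root[(i, j)]
--             if r not in assigned:
--                 assigned[r] = letters[len(assigned)]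
--             row.append(assigned[r])
--         labels.append(row)
--     return labels
-- ===== Notes on version B (the rewrite author's own statement) =====
-- stated objective: alternative
-- what changed: Replaces A's memoized steepest-descent walks over a mutable label grid by an altitude-ordered dynamic program: cells are sorted by altitude and each cell's basin root is computed by one dictionary lookup of its already-processed strictly-lower parent (no path following at all); a second row-major pass hands out letters by first root seen.
-- outside the precondition, e.g. on solve_case((1, 1, [])): A returns [['a']], B raises IndexError
import Mathlib
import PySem

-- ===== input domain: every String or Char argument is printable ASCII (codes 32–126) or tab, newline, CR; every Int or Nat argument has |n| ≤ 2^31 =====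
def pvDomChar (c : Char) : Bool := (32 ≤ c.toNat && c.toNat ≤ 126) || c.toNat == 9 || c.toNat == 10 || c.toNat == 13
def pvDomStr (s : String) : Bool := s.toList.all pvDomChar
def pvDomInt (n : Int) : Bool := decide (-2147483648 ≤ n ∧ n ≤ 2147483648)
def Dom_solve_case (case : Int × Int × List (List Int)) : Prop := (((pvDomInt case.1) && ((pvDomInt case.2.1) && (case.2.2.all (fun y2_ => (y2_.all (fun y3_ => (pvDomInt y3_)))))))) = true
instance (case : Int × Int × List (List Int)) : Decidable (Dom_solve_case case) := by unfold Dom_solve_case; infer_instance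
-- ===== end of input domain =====

-- B replaces A's memoized steepest-descent walks by an altitude-ordered dynamic program: cells
-- sorted by altitude, each cell's basin root is one dictionary lookup of its strictly-lower
-- parent (already processed); letters are handed out by first root seen in a second row-major
-- pass. Objective: alternative algorithm, similar cost.

-- Shared cell accessor: altitudes[i][j]; the defaults are only reachable outside Pre_, where Python raises
def pvAlt (g : List (List Int)) (i j : Int) : Int :=
  PySem.List.pyGetD (PySem.List.pyGetD g i []) j 0

def pvDirs : List (Int × Int) := [(-1, 0), (0, -1), (0, 1), (1, 0)]

def pvAlphabet : List String :=
  ["a","b","c","d","e","f","g","h","i","j","k","l","m",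
   "n","o","p","q","r","s","t","u","v","w","x","y","z"]

-- ===== PORT A =====

-- key p = (altitudes[p0][p1], p0, p1), compared lexicographically (Python tuple <)
def pvKeyLtA (g : List (List Int)) (p q : Int × Int) : Bool :=
  decide (pvAlt g p.1 p.2 < pvAlt g q.1 q.2 ∨
    (pvAlt g p.1 p.2 = pvAlt g q.1 q.2 ∧ (p.1 < q.1 ∨ (p.1 = q.1 ∧ p.2 < q.2))))

-- min(…, key=…) over a nonempty collection; exact: the key is injective on cells, so
-- Python's set iteration order cannot matter
def pvMinKeyA (g : List (List Int)) : List (Int × Int) → Option (Int × Int)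
  | [] => none
  | x :: t => some (t.foldl (fun b p => if pvKeyLtA g p b then p else b) x)

-- labels[i][j] (read); `if labels[i][j]:` — stored labels are single letters, hence truthy iff set
def pvLabelAt (labels : List (List (Option String))) (c : Int × Int) : Option String :=
  PySem.List.pyGetD (PySem.List.pyGetD labels c.1 []) c.2 none

-- labels[i][j] = symb
def pvSetLabel (labels : List (List (Option String))) (c : Int × Int) (s : String) :
    List (List (Option String)) :=
  PySem.List.pySetD labels c.1 (PySem.List.pySetD (PySem.List.pyGetD labels c.1 []) c.2 (some s))

-- A's `while True` walk; fuel (H*W+1) exceeds the length of any strict descent chain, so under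
-- Pre_ the 0-fuel branch is never reached
def pvWalkA (g : List (List Int)) (H W : Int) :
    Nat → List (List (Option String)) → List String → Int → Int → List (Int × Int) →
    String × List (Int × Int) × List String
  | 0, _, symbols, _, _, path => ("", path, symbols)
  | fuel + 1, labels, symbols, i, j, path =>
    match pvLabelAt labels (i, j) with
    | some s => (s, path, symbols)
    | none =>
      let path' := path ++ [(i, j)]
      let nb : PySem.Set (Int × Int) := pvDirs.foldl (fun s d =>
        if decide (0 ≤ i + d.1 ∧ i + d.1 < H ∧ 0 ≤ j + d.2 ∧ j + d.2 < W) &&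
           decide (pvAlt g (i + d.1) (j + d.2) < pvAlt g i j)
        then PySem.Set.add s (i + d.1, j + d.2) else s) PySem.Set.empty
      if nb.isEmpty then
        match PySem.List.pop? symbols (-1) with
        | some r => (r.1, path', r.2)
        | none => ("", path', symbols)   -- symbols.pop() raises IndexError: outside Pre_
      else
        match pvMinKeyA g nb with
        | some p => pvWalkA g H W fuel labels symbols p.1 p.2 path'
        | none => ("", path', symbols)   -- unreachable: nb is nonempty here

def solve_case (case : Int × Int × List (List Int)) : List (List String) :=
  let H := case.1
  let W := case.2.1
  let g := case.2.2
  let symbols0 := pvAlphabet.reverse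
  let labels0 : List (List (Option String)) :=
    (PySem.List.pyRange 0 H 1).map (fun _ => List.replicate W.toNat (none : Option String))
  let res := (PySem.List.pyRange 0 H 1).foldl (fun st i0 =>
    (PySem.List.pyRange 0 W 1).foldl (fun st j0 =>
      let r := pvWalkA g H W (H.toNat * W.toNat + 1) st.1 st.2 i0 j0 []
      (r.2.1.foldl (fun L p => pvSetLabel L p r.1) st.1, r.2.2)) st) (labels0, symbols0)
  -- under Pre_ every cell has been labelled; "" is never selected
  res.1.map (fun row => row.map (fun o => o.getD ""))

-- ===== PORT B =====

-- (altitudes[ni][nj], ni, nj) < (altitudes[bi][bj], bi, bj), written as Source B's tuple comparison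
def pvKeyLtB (g : List (List Int)) (p q : Int × Int) : Bool :=
  if pvAlt g p.1 p.2 = pvAlt g q.1 q.2 then
    (if p.1 = q.1 then decide (p.2 < q.2) else decide (p.1 < q.1))
  else decide (pvAlt g p.1 p.2 < pvAlt g q.1 q.2)

-- Source B's `parent` helper: best strictly-lower in-bounds neighbour of (i, j), none = sink
def pvParentOf (g : List (List Int)) (H W i j : Int) : Option (Int × Int) :=
  pvDirs.foldl (fun best d =>
    if decide (0 ≤ i + d.1 ∧ i + d.1 < H ∧ 0 ≤ j + d.2 ∧ j + d.2 < W) &&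
       decide (pvAlt g (i + d.1) (j + d.2) < pvAlt g i j) then
      match best with
      | none => some (i + d.1, j + d.2)
      | some b => if pvKeyLtB g (i + d.1, j + d.2) b then some (i + d.1, j + d.2) else some b
    else best) none

def solve_case_alt (case : Int × Int × List (List Int)) : List (List String) :=
  let H := case.1
  let W := case.2.1
  let g := case.2.2
  -- cells sorted by altitude (stable, generator order = row-major)
  let cells := PySem.List.sorted
    ((PySem.List.pyRange 0 H 1).flatMap (fun i =>
      (PySem.List.pyRange 0 W 1).map (fun j => (i, j))))
    (fun c => pvAlt g c.1 c.2)
  let root := cells.foldl (fun d c =>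
    match pvParentOf g H W c.1 c.2 with
    | none => d.insert c c
    -- root[p]: the KeyError is unreachable — p is strictly lower, hence already processed
    | some p => d.insert c (d.getD p c))
    (PySem.Dict.empty : PySem.Dict (Int × Int) (Int × Int))
  let letters := pvAlphabet
  let res := (PySem.List.pyRange 0 H 1).foldl (fun st i =>
    let rowSt := (PySem.List.pyRange 0 W 1).foldl (fun st2 j =>
      let r := root.getD (i, j) (i, j)   -- root[(i, j)]: every grid cell is a key
      let assigned := if st2.1.contains r then st2.1
        -- letters[len(assigned)]: the default is only reached past 26 basins, where Python raises
        else st2.1.insert r ((PySem.List.pyGet? letters (PySem.Dict.size st2.1)).getD "")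
      (assigned, st2.2 ++ [assigned.getD r ""])) (st.1, ([] : List String))
    (rowSt.1, st.2 ++ [rowSt.2]))
    ((PySem.Dict.empty : PySem.Dict (Int × Int) String), ([] : List (List String)))
  res.2

-- ===== PRECONDITION & SPEC =====

-- all cells (i, j), 0 ≤ i < H, 0 ≤ j < W, in row-major order
def pvCells (H W : Int) : List (Int × Int) :=
  (PySem.List.pyRange 0 H 1).flatMap (fun i => (PySem.List.pyRange 0 W 1).map (fun j => (i, j)))

-- a cell with no strictly lower in-bounds 4-neighbour (a basin sink / local minimum)
def pvIsSink (g : List (List Int)) (H W : Int) (c : Int × Int) : Bool :=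
  pvDirs.all (fun d =>
    !(decide (0 ≤ c.1 + d.1 ∧ c.1 + d.1 < H ∧ 0 ≤ c.2 + d.2 ∧ c.2 + d.2 < W) &&
      decide (pvAlt g (c.1 + d.1) (c.2 + d.2) < pvAlt g c.1 c.2)))

-- Pre_ excludes the inputs where Python A raises: grids whose row list / rows are shorter than
-- H × W (IndexError while reading altitudes) and maps with more than 26 basin sinks
-- (symbols.pop() from the empty list). It also excludes 1×1 cases with a short grid, where A
-- happens to return (it never reads the single cell) but B's sort key reads it and raises.
def Pre_solve_case (case : Int × Int × List (List Int)) : Prop :=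
  (case.1 ≤ 0 ∨ case.2.1 ≤ 0) ∨
    ((((case.1 : Int) ≤ case.2.2.length ∧
        (∀ row ∈ case.2.2.take case.1.toNat, (case.2.1 : Int) ≤ row.length))) ∧
      (pvCells case.1 case.2.1).countP (fun c => pvIsSink case.2.2 case.1 case.2.1 c) ≤ 26)

instance (case : Int × Int × List (List Int)) : Decidable (Pre_solve_case case) := by
  unfold Pre_solve_case; infer_instance

def pvWitness_solve_case : (Int × Int × List (List Int)) := (2, 2, [[1, 2], [3, 0]])

def Spec_solve_case (case : Int × Int × List (List Int)) (out : List (List String)) : Prop :=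
  out = solve_case_alt case
instance (case : Int × Int × List (List Int)) (out : List (List String)) :
    Decidable (Spec_solve_case case out) := by unfold Spec_solve_case; infer_instance

-- ===== CLAIM (what is proved, stated in full; the proofs are below) =====
def Claim_equal_solve_case : Prop := ∀ (case : Int × Int × List (List Int)),
  Dom_solve_case case → Pre_solve_case case → Spec_solve_case case (solve_case case)

-- ===== LEMMAS AND PROOFS =====

-- the strict lexicographic key order on cells, as a Prop
def pvKLt (g : List (List Int)) (p q : Int × Int) : Prop :=
  pvAlt g p.1 p.2 < pvAlt g q.1 q.2 ∨
    (pvAlt g p.1 p.2 = pvAlt g q.1 q.2 ∧ (p.1 < q.1 ∨ (p.1 = q.1 ∧ p.2 < q.2)))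

theorem pvKeyLtA_iff (g : List (List Int)) (p q : Int × Int) :
    pvKeyLtA g p q = true ↔ pvKLt g p q := by
  unfold pvKeyLtA pvKLt; simp

theorem pvKeyLtB_eq_A (g : List (List Int)) (p q : Int × Int) :
    pvKeyLtB g p q = pvKeyLtA g p q := by
  unfold pvKeyLtB pvKeyLtA
  split_ifs with h1 h2 <;> rw [decide_eq_decide] <;> omega

theorem pvKLt_irrefl (g : List (List Int)) (p : Int × Int) : ¬ pvKLt g p p := by
  unfold pvKLt; omega

theorem pvKLt_trans (g : List (List Int)) {p q r : Int × Int} :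
    pvKLt g p q → pvKLt g q r → pvKLt g p r := by
  unfold pvKLt; omega

theorem pvKLt_total (g : List (List Int)) (p q : Int × Int) :
    pvKLt g p q ∨ p = q ∨ pvKLt g q p := by
  obtain ⟨p1, p2⟩ := p; obtain ⟨q1, q2⟩ := q
  have h : (p1, p2) = (q1, q2) ↔ (p1 = q1 ∧ p2 = q2) := by simp
  rw [h]; unfold pvKLt
  rcases lt_trichotomy (pvAlt g p1 p2) (pvAlt g q1 q2) with h | h | h <;> simp_all <;> omega

-- "not-less" is transitive (so a running minimum stays a minimum)
theorem pvKLt_nle_trans (g : List (List Int)) {a b c : Int × Int} :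
    ¬ pvKLt g a b → ¬ pvKLt g b c → ¬ pvKLt g a c := by
  intro hab hbc hac
  rcases pvKLt_total g b c with h | h | h
  · exact hbc h
  · exact hab (h ▸ hac)
  · exact hab (pvKLt_trans g hac h)

-- the running minimum of A's `min(…, key=…)`
theorem pvFoldA_mem (g : List (List Int)) (t : List (Int × Int)) (x : Int × Int) :
    t.foldl (fun b p => if pvKeyLtA g p b then p else b) x ∈ x :: t := by
  induction t generalizing x with
  | nil => simp
  | cons p t ih =>
    simp only [List.foldl_cons]
    rcases List.mem_cons.mp (ih (if pvKeyLtA g p x then p else x)) with h | h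
    · rw [h]; split_ifs <;> simp
    · simp [List.mem_cons, h]

theorem pvFoldA_min (g : List (List Int)) (t : List (Int × Int)) (x : Int × Int) :
    ∀ y ∈ x :: t, ¬ pvKLt g y (t.foldl (fun b p => if pvKeyLtA g p b then p else b) x) := by
  induction t generalizing x with
  | nil =>
    intro y hy
    rcases List.mem_cons.mp hy with h | h
    · subst h; exact pvKLt_irrefl g _
    · simp at h
  | cons p t ih =>
    intro y hy
    simp only [List.foldl_cons]
    have hstep : ¬ pvKLt g x (if pvKeyLtA g p x then p else x) ∧
        ¬ pvKLt g p (if pvKeyLtA g p x then p else x) := by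
      split_ifs with h
      · rw [pvKeyLtA_iff] at h
        exact ⟨fun hc => pvKLt_irrefl g _ (pvKLt_trans g h hc), pvKLt_irrefl g _⟩
      · rw [pvKeyLtA_iff] at h
        exact ⟨pvKLt_irrefl g _, h⟩
    have hrest := ih (if pvKeyLtA g p x then p else x)
    have hhead := hrest _ (List.mem_cons_self)
    rcases List.mem_cons.mp hy with h | h
    · subst h; exact pvKLt_nle_trans g hstep.1 hhead
    · rcases List.mem_cons.mp h with h | h
      · subst h; exact pvKLt_nle_trans g hstep.2 hhead
      · exact hrest _ (List.mem_cons_of_mem _ h)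

theorem pvMin_unique (g : List (List Int)) {l : List (Int × Int)} {r r' : Int × Int}
    (h1 : r ∈ l) (h2 : ∀ y ∈ l, ¬ pvKLt g y r)
    (h3 : r' ∈ l) (h4 : ∀ y ∈ l, ¬ pvKLt g y r') : r = r' := by
  rcases pvKLt_total g r r' with h | h | h
  · exact absurd h (h4 r h1)
  · exact h
  · exact absurd h (h2 r' h3)

-- the candidate list both programs inspect: in-bounds strictly-lower 4-neighbours, in direction order
def pvNbrs (g : List (List Int)) (H W : Int) (c : Int × Int) : List (Int × Int) :=
  (pvDirs.map (fun d => (c.1 + d.1, c.2 + d.2))).filter (fun p =>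
    decide (0 ≤ p.1 ∧ p.1 < H ∧ 0 ≤ p.2 ∧ p.2 < W) &&
    decide (pvAlt g p.1 p.2 < pvAlt g c.1 c.2))

-- B's parent computation is the fold of the option-minimum over the candidates
theorem pvFoldlGuardMap {α β σ : Type} (l : List α) (F : σ → β → σ) (P : β → Bool)
    (f : α → β) (init : σ) :
    l.foldl (fun best d => if P (f d) then F best (f d) else best) init =
      ((l.map f).filter P).foldl F init := by
  induction l generalizing init with
  | nil => rfl
  | cons a l ih =>
    simp only [List.foldl_cons, List.map_cons, List.filter_cons]
    by_cases h : P (f a) <;> simp [h, ih]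

-- the incremental "best so far" update of Source B
def pvPickB (g : List (List Int)) (best : Option (Int × Int)) (p : Int × Int) :
    Option (Int × Int) :=
  match best with
  | none => some p
  | some b => if pvKeyLtB g p b then some p else some b

theorem pvParentOf_eq_fold (g : List (List Int)) (H W i j : Int) :
    pvParentOf g H W i j = (pvNbrs g H W (i, j)).foldl (pvPickB g) none :=
  pvFoldlGuardMap pvDirs (pvPickB g)
    (fun p => decide (0 ≤ p.1 ∧ p.1 < H ∧ 0 ≤ p.2 ∧ p.2 < W) &&
      decide (pvAlt g p.1 p.2 < pvAlt g i j))
    (fun d => (i + d.1, j + d.2)) none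

theorem pvFoldB_some (g : List (List Int)) (l : List (Int × Int)) (b : Int × Int) :
    l.foldl (pvPickB g) (some b) =
    some (l.foldl (fun b p => if pvKeyLtA g p b then p else b) b) := by
  induction l generalizing b with
  | nil => rfl
  | cons p t ih =>
    simp only [List.foldl_cons, pvPickB, pvKeyLtB_eq_A]
    split_ifs with h <;> rw [ih]

theorem pvParentOf_none_iff (g : List (List Int)) (H W i j : Int) :
    pvParentOf g H W i j = none ↔ pvNbrs g H W (i, j) = [] := by
  rw [pvParentOf_eq_fold]
  cases h : pvNbrs g H W (i, j) with
  | nil => simp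
  | cons p t =>
    simp only [List.foldl_cons]
    have : pvPickB g none p = some p := rfl
    rw [this, pvFoldB_some]
    simp

theorem pvParentOf_spec (g : List (List Int)) (H W i j : Int) {c' : Int × Int}
    (h : pvParentOf g H W i j = some c') :
    c' ∈ pvNbrs g H W (i, j) ∧ ∀ y ∈ pvNbrs g H W (i, j), ¬ pvKLt g y c' := by
  rw [pvParentOf_eq_fold] at h
  cases hn : pvNbrs g H W (i, j) with
  | nil => rw [hn] at h; simp at h
  | cons p t =>
    rw [hn] at h
    simp only [List.foldl_cons] at h
    have hred : pvPickB g none p = some p := rfl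
    rw [hred, pvFoldB_some] at h
    have := pvFoldA_mem g t p
    have hm := pvFoldA_min g t p
    rw [Option.some_inj] at h
    subst h
    exact ⟨this, hm⟩

theorem pvMinKeyA_spec (g : List (List Int)) {l : List (Int × Int)} (h : l ≠ []) :
    ∃ r, pvMinKeyA g l = some r ∧ r ∈ l ∧ ∀ y ∈ l, ¬ pvKLt g y r := by
  cases l with
  | nil => exact absurd rfl h
  | cons x t => exact ⟨_, rfl, pvFoldA_mem g t x, pvFoldA_min g t x⟩

-- membership in A's neighbour set
theorem pvMem_setfold {β : Type} (l : List β) (P : β → Bool) (f : β → Int × Int)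
    (s : PySem.Set (Int × Int)) (x : Int × Int) :
    x ∈ l.foldl (fun s d => if P d then PySem.Set.add s (f d) else s) s ↔
      x ∈ s ∨ ∃ d ∈ l, P d ∧ f d = x := by
  induction l generalizing s with
  | nil => simp
  | cons a l ih =>
    simp only [List.foldl_cons]
    by_cases h : P a
    · rw [if_pos h, ih]
      simp only [PySem.Set.mem_add]
      constructor
      · rintro ((hs | hs) | ⟨d, hd, hP, hf⟩)
        · exact Or.inl hs
        · exact Or.inr ⟨a, by simp, h, hs.symm⟩
        · exact Or.inr ⟨d, by simp [hd], hP, hf⟩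
      · rintro (hs | ⟨d, hd, hP, hf⟩)
        · exact Or.inl (Or.inl hs)
        · rcases List.mem_cons.mp hd with rfl | hd
          · exact Or.inl (Or.inr hf.symm)
          · exact Or.inr ⟨d, hd, hP, hf⟩
    · rw [if_neg h, ih]
      constructor
      · rintro (hs | ⟨d, hd, hP, hf⟩)
        · exact Or.inl hs
        · exact Or.inr ⟨d, by simp [hd], hP, hf⟩
      · rintro (hs | ⟨d, hd, hP, hf⟩)
        · exact Or.inl hs
        · rcases List.mem_cons.mp hd with rfl | hd
          · exact absurd hP (by simp [h])
          · exact Or.inr ⟨d, hd, hP, hf⟩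

theorem pvMem_nbrs (g : List (List Int)) (H W : Int) (c x : Int × Int) :
    x ∈ pvNbrs g H W c ↔ (∃ d ∈ pvDirs, (c.1 + d.1, c.2 + d.2) = x) ∧
      (0 ≤ x.1 ∧ x.1 < H ∧ 0 ≤ x.2 ∧ x.2 < W) ∧ pvAlt g x.1 x.2 < pvAlt g c.1 c.2 := by
  unfold pvNbrs
  simp only [List.mem_filter, List.mem_map, Bool.and_eq_true, decide_eq_true_eq]

-- ---------- cells, ranks, roots ----------

def pvInbP (H W : Int) (c : Int × Int) : Prop :=
  0 ≤ c.1 ∧ c.1 < H ∧ 0 ≤ c.2 ∧ c.2 < W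

theorem pvMem_cells (H W : Int) (c : Int × Int) :
    c ∈ pvCells H W ↔ pvInbP H W c := by
  unfold pvCells pvInbP
  simp only [List.mem_flatMap, List.mem_map, PySem.List.mem_pyRange_one]
  constructor
  · rintro ⟨i, hi, j, hj, rfl⟩; exact ⟨hi.1, hi.2, hj.1, hj.2⟩
  · rintro ⟨h1, h2, h3, h4⟩; exact ⟨c.1, ⟨h1, h2⟩, c.2, ⟨h3, h4⟩, rfl⟩

theorem pvCells_length (H W : Int) : (pvCells H W).length = H.toNat * W.toNat := by
  unfold pvCells
  rw [List.length_flatMap]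
  have : ∀ i : Int, ((PySem.List.pyRange 0 W 1).map (fun j => (i, j))).length = W.toNat := by
    intro i; rw [List.length_map, PySem.List.length_pyRange_one]; omega
  rw [List.map_congr_left (fun i _ => this i)]
  rw [List.map_const', List.sum_replicate, smul_eq_mul, PySem.List.length_pyRange_one,
    Int.sub_zero]

-- descent measure: the number of cells strictly below c
def pvRank (g : List (List Int)) (H W : Int) (c : Int × Int) : Nat :=
  (pvCells H W).countP (fun p => decide (pvAlt g p.1 p.2 < pvAlt g c.1 c.2))

theorem pvParentOf_lower (g : List (List Int)) (H W : Int) {c c' : Int × Int}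
    (h : pvParentOf g H W c.1 c.2 = some c') :
    pvInbP H W c' ∧ pvAlt g c'.1 c'.2 < pvAlt g c.1 c.2 := by
  have hm := (pvParentOf_spec g H W c.1 c.2 h).1
  rw [pvMem_nbrs] at hm
  exact ⟨⟨hm.2.1.1, hm.2.1.2.1, hm.2.1.2.2.1, hm.2.1.2.2.2⟩, hm.2.2⟩

theorem pvRank_lt (g : List (List Int)) (H W : Int) {c c' : Int × Int}
    (h : pvParentOf g H W c.1 c.2 = some c') :
    pvRank g H W c' < pvRank g H W c := by
  obtain ⟨hin, hlt⟩ := pvParentOf_lower g H W h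
  have hmem : c' ∈ pvCells H W := (pvMem_cells H W c').mpr hin
  unfold pvRank
  obtain ⟨l1, l2, heq⟩ := List.append_of_mem hmem
  rw [heq, List.countP_append, List.countP_append, List.countP_cons, List.countP_cons]
  have h1 : List.countP (fun p => decide (pvAlt g p.1 p.2 < pvAlt g c'.1 c'.2)) l1 ≤
      List.countP (fun p => decide (pvAlt g p.1 p.2 < pvAlt g c.1 c.2)) l1 :=
    List.countP_mono_left (fun p _ hp => by simp at hp ⊢; omega)
  have h2 : List.countP (fun p => decide (pvAlt g p.1 p.2 < pvAlt g c'.1 c'.2)) l2 ≤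
      List.countP (fun p => decide (pvAlt g p.1 p.2 < pvAlt g c.1 c.2)) l2 :=
    List.countP_mono_left (fun p _ hp => by simp at hp ⊢; omega)
  have h3 : (if decide (pvAlt g c'.1 c'.2 < pvAlt g c'.1 c'.2) = true then 1 else 0) = 0 := by
    simp
  have h4 : (if decide (pvAlt g c'.1 c'.2 < pvAlt g c.1 c.2) = true then 1 else 0) = 1 := by
    simp [hlt]
  simp only [] at *
  omega

theorem pvRank_le (g : List (List Int)) (H W : Int) (c : Int × Int) :
    pvRank g H W c ≤ H.toNat * W.toNat := by
  unfold pvRank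
  rw [← pvCells_length H W]
  exact List.countP_le_length

def pvRootN (g : List (List Int)) (H W : Int) : Nat → (Int × Int) → (Int × Int)
  | 0, c => c
  | fuel + 1, c =>
    match pvParentOf g H W c.1 c.2 with
    | none => c
    | some c' => pvRootN g H W fuel c'

theorem pvRootN_congr (g : List (List Int)) (H W : Int) :
    ∀ (f1 : Nat) (c : Int × Int) (f2 : Nat), pvRank g H W c < f1 → pvRank g H W c < f2 →
      pvRootN g H W f1 c = pvRootN g H W f2 c := by
  intro f1
  induction f1 with
  | zero => intro c f2 h; omega
  | succ f1 ih =>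
    intro c f2 h1 h2
    cases f2 with
    | zero => omega
    | succ f2 =>
      show pvRootN g H W (f1 + 1) c = pvRootN g H W (f2 + 1) c
      unfold pvRootN
      cases hp : pvParentOf g H W c.1 c.2 with
      | none => rfl
      | some c' =>
        have := pvRank_lt g H W hp
        exact ih c' f2 (by omega) (by omega)

def pvRoot (g : List (List Int)) (H W : Int) (c : Int × Int) : Int × Int :=
  pvRootN g H W (H.toNat * W.toNat + 1) c

theorem pvRoot_of_sink (g : List (List Int)) (H W : Int) {c : Int × Int}
    (h : pvParentOf g H W c.1 c.2 = none) : pvRoot g H W c = c := by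
  unfold pvRoot pvRootN
  rw [h]

theorem pvRoot_step (g : List (List Int)) (H W : Int) {c c' : Int × Int}
    (h : pvParentOf g H W c.1 c.2 = some c') : pvRoot g H W c = pvRoot g H W c' := by
  unfold pvRoot
  have hstep : pvRootN g H W (H.toNat * W.toNat + 1) c = pvRootN g H W (H.toNat * W.toNat) c' := by
    simp only [pvRootN, h]
  rw [hstep]
  have hlt := pvRank_lt g H W h
  have hle := pvRank_le g H W c
  exact pvRootN_congr g H W _ c' _ (by omega) (by omega)

theorem pvRoot_strong (g : List (List Int)) (H W : Int) :
    ∀ (n : Nat) (c : Int × Int), pvRank g H W c ≤ n →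
      pvParentOf g H W (pvRoot g H W c).1 (pvRoot g H W c).2 = none ∧
      (pvInbP H W c → pvInbP H W (pvRoot g H W c)) := by
  intro n
  induction n with
  | zero =>
    intro c h
    cases hp : pvParentOf g H W c.1 c.2 with
    | none => rw [pvRoot_of_sink g H W hp]; exact ⟨hp, fun h => h⟩
    | some c' => have := pvRank_lt g H W hp; omega
  | succ n ih =>
    intro c h
    cases hp : pvParentOf g H W c.1 c.2 with
    | none => rw [pvRoot_of_sink g H W hp]; exact ⟨hp, fun h => h⟩
    | some c' =>
      have hlt := pvRank_lt g H W hp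
      rw [pvRoot_step g H W hp]
      obtain ⟨h1, h2⟩ := ih c' (by omega)
      exact ⟨h1, fun _ => h2 (pvParentOf_lower g H W hp).1⟩

theorem pvRoot_sink (g : List (List Int)) (H W : Int) (c : Int × Int) :
    pvParentOf g H W (pvRoot g H W c).1 (pvRoot g H W c).2 = none :=
  (pvRoot_strong g H W (pvRank g H W c) c le_rfl).1

theorem pvRoot_inb (g : List (List Int)) (H W : Int) {c : Int × Int} (h : pvInbP H W c) :
    pvInbP H W (pvRoot g H W c) :=
  (pvRoot_strong g H W (pvRank g H W c) c le_rfl).2 h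

-- a cell passes Pre_'s sink test iff it has no parent
theorem pvIsSink_iff (g : List (List Int)) (H W : Int) (c : Int × Int) :
    pvIsSink g H W c = true ↔ pvParentOf g H W c.1 c.2 = none := by
  rw [pvParentOf_none_iff]
  unfold pvIsSink
  constructor
  · intro h
    rw [List.eq_nil_iff_forall_not_mem]
    intro x hx
    rw [pvMem_nbrs] at hx
    obtain ⟨⟨d, hd, hdx⟩, hin, hlt⟩ := hx
    have hall := List.all_eq_true.mp h d hd
    rw [← hdx] at hin hlt
    simp only [] at hin hlt
    simp only [Bool.not_eq_eq_eq_not, Bool.not_true, Bool.and_eq_false_iff,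
      decide_eq_false_iff_not] at hall
    rcases hall with h1 | h1
    · exact h1 ⟨hin.1, hin.2.1, hin.2.2.1, hin.2.2.2⟩
    · exact h1 hlt
  · intro h
    rw [List.all_eq_true]
    intro d hd
    by_contra hc
    simp only [Bool.not_eq_eq_eq_not, Bool.not_true, Bool.not_eq_false, Bool.and_eq_true,
      decide_eq_true_eq] at hc
    have h1 : (c.1 + d.1, c.2 + d.2) ∈ pvNbrs g H W c := by
      rw [pvMem_nbrs]
      exact ⟨⟨d, hd, rfl⟩, hc.1, hc.2⟩
    rw [h] at h1
    simp at h1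

-- ---------- basin roots, first-occurrence order, letters ----------

def pvRoots (g : List (List Int)) (H W : Int) : List (Int × Int) :=
  PySem.List.dedup ((pvCells H W).map (pvRoot g H W))

def pvLabelOf (g : List (List Int)) (H W : Int) (c : Int × Int) : String :=
  pvAlphabet.getD ((PySem.List.index? (pvRoots g H W) (pvRoot g H W c)).getD 0) ""

def pvSpecGrid (g : List (List Int)) (H W : Int) : List (List String) :=
  (PySem.List.pyRange 0 H 1).map (fun i =>
    (PySem.List.pyRange 0 W 1).map (fun j => pvLabelOf g H W (i, j)))

theorem pvSet_add_of_mem {s : PySem.Set (Int × Int)} {x : Int × Int} (h : x ∈ s) :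
    s.add x = s := by
  unfold PySem.Set.add; simp [h]

theorem pvSet_add_of_not_mem {s : PySem.Set (Int × Int)} {x : Int × Int} (h : ¬ x ∈ s) :
    s.add x = s ++ [x] := by
  unfold PySem.Set.add; simp [h]

theorem pvPrefix_update (s : PySem.Set (Int × Int)) (t : List (Int × Int)) :
    s <+: PySem.Set.update s t := by
  induction t generalizing s with
  | nil => exact List.prefix_rfl
  | cons x t ih =>
    have h1 : s <+: s.add x := by
      by_cases h : x ∈ s
      · rw [pvSet_add_of_mem h]
      · rw [pvSet_add_of_not_mem h]; exact List.prefix_append s [x]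
    exact h1.trans (ih (s.add x))

theorem pvDedup_prefix {l1 l2 : List (Int × Int)} (h : l1 <+: l2) :
    PySem.List.dedup l1 <+: PySem.List.dedup l2 := by
  obtain ⟨t, rfl⟩ := h
  rw [PySem.List.dedup_eq_ofList, PySem.List.dedup_eq_ofList, PySem.Set.ofList_append]
  exact pvPrefix_update _ t

theorem pvDedup_append_mem {l : List (Int × Int)} {x : Int × Int} (h : x ∈ PySem.List.dedup l) :
    PySem.List.dedup (l ++ [x]) = PySem.List.dedup l := by
  rw [PySem.List.dedup_eq_ofList, PySem.Set.ofList_append]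
  rw [PySem.List.dedup_eq_ofList] at h
  exact pvSet_add_of_mem h

theorem pvDedup_append_fresh {l : List (Int × Int)} {x : Int × Int}
    (h : ¬ x ∈ PySem.List.dedup l) :
    PySem.List.dedup (l ++ [x]) = PySem.List.dedup l ++ [x] := by
  rw [PySem.List.dedup_eq_ofList, PySem.Set.ofList_append]
  rw [PySem.List.dedup_eq_ofList] at h
  exact pvSet_add_of_not_mem h

-- every root of a grid cell is a sink of the grid, so there are at most #sinks many of them
theorem pvRoots_card_le (g : List (List Int)) (H W : Int) :
    (pvRoots g H W).length ≤ (pvCells H W).countP (fun c => pvIsSink g H W c) := by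
  rw [List.countP_eq_length_filter]
  have hsub : pvRoots g H W ⊆ (pvCells H W).filter (fun c => pvIsSink g H W c) := by
    intro r hr
    unfold pvRoots at hr
    rw [PySem.List.mem_dedup] at hr
    obtain ⟨c, hc, rfl⟩ := List.mem_map.mp hr
    rw [List.mem_filter]
    constructor
    · exact (pvMem_cells H W _).mpr (pvRoot_inb g H W ((pvMem_cells H W c).mp hc))
    · rw [pvIsSink_iff]
      exact pvRoot_sink g H W c
  exact ((PySem.List.nodup_dedup _).subperm hsub).length_le

theorem pvIndex_fresh {g : List (List Int)} {H W : Int} {P : List (Int × Int)} {c : Int × Int}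
    (hP : P ++ [c] <+: pvCells H W)
    (hfr : ¬ pvRoot g H W c ∈ PySem.List.dedup (P.map (pvRoot g H W))) :
    PySem.List.index? (pvRoots g H W) (pvRoot g H W c) =
      some (PySem.List.dedup (P.map (pvRoot g H W))).length := by
  have hpre : PySem.List.dedup ((P ++ [c]).map (pvRoot g H W)) <+: pvRoots g H W :=
    pvDedup_prefix (hP.map (pvRoot g H W))
  rw [List.map_append, List.map_singleton, pvDedup_append_fresh hfr] at hpre
  obtain ⟨t, ht⟩ := hpre
  rw [← ht, List.append_assoc]
  rw [PySem.List.index?_eq_some_iff]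
  exact ⟨_, _, rfl, rfl, hfr⟩

-- ---------- the B side: the sorted cell list and the root dictionary ----------

theorem pvNestedFold {σ : Type} (H W : Int) (f : σ → (Int × Int) → σ) (init : σ) :
    (PySem.List.pyRange 0 H 1).foldl (fun st i =>
      (PySem.List.pyRange 0 W 1).foldl (fun st j => f st (i, j)) st) init =
    (pvCells H W).foldl f init := by
  unfold pvCells
  rw [List.foldl_flatMap]
  have h : ∀ (st : σ) (i : Int), ((PySem.List.pyRange 0 W 1).map (fun j => (i, j))).foldl f st =
      (PySem.List.pyRange 0 W 1).foldl (fun st j => f st (i, j)) st := by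
    intro st i; rw [List.foldl_map]
  simp only [h]

-- the altitude-sorted cell list of Source B's first pass
def pvCellsSorted (g : List (List Int)) (H W : Int) : List (Int × Int) :=
  PySem.List.sorted (pvCells H W) (fun c => pvAlt g c.1 c.2)

def pvRootStep (g : List (List Int)) (H W : Int)
    (d : PySem.Dict (Int × Int) (Int × Int)) (c : Int × Int) :
    PySem.Dict (Int × Int) (Int × Int) :=
  match pvParentOf g H W c.1 c.2 with
  | none => d.insert c c
  | some p => d.insert c (d.getD p c)

def pvRootD (g : List (List Int)) (H W : Int) : PySem.Dict (Int × Int) (Int × Int) :=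
  (pvCellsSorted g H W).foldl (pvRootStep g H W) PySem.Dict.empty

-- a cell's parent sits strictly earlier in the altitude-sorted list
theorem pvParent_mem_prefix (g : List (List Int)) (H W : Int)
    {P Q : List (Int × Int)} {c p : Int × Int}
    (hsplit : pvCellsSorted g H W = P ++ c :: Q)
    (hp : pvParentOf g H W c.1 c.2 = some p) : p ∈ P := by
  obtain ⟨hin, hlt⟩ := pvParentOf_lower g H W hp
  have hmem : p ∈ pvCellsSorted g H W := by
    rw [pvCellsSorted, PySem.List.mem_sorted]
    exact (pvMem_cells H W p).mpr hin
  rw [hsplit] at hmem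
  have hpair : (P ++ c :: Q).Pairwise
      (fun a b => pvAlt g a.1 a.2 ≤ pvAlt g b.1 b.2) := by
    rw [← hsplit]
    exact PySem.List.sorted_pairwise (pvCells H W) (fun c => pvAlt g c.1 c.2)
  rcases List.mem_append.mp hmem with h | h
  · exact h
  · rcases List.mem_cons.mp h with rfl | h
    · omega
    · have hcq := (List.pairwise_append.mp hpair).2.1
      have := (List.pairwise_cons.mp hcq).1 p h
      omega

theorem pvRootFold_seg (g : List (List Int)) (H W : Int) :
    ∀ (Q P : List (Int × Int)) (d : PySem.Dict (Int × Int) (Int × Int)),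
      pvCellsSorted g H W = P ++ Q →
      (∀ x, d.get? x = if x ∈ P then some (pvRoot g H W x) else none) →
      ∀ x, (Q.foldl (pvRootStep g H W) d).get? x =
        if x ∈ P ++ Q then some (pvRoot g H W x) else none := by
  intro Q
  induction Q with
  | nil => intro P d _ hd x; simpa using hd x
  | cons c Q ih =>
    intro P d hsplit hd
    have hval : pvRootStep g H W d c = d.insert c (pvRoot g H W c) := by
      unfold pvRootStep
      cases hp : pvParentOf g H W c.1 c.2 with
      | none => rw [pvRoot_of_sink g H W hp]
      | some p =>
        have hmemP : p ∈ P := pvParent_mem_prefix g H W hsplit hp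
        show d.insert c (d.getD p c) = d.insert c (pvRoot g H W c)
        rw [PySem.Dict.getD_eq_get?_getD, hd p, if_pos hmemP, Option.getD_some,
          pvRoot_step g H W hp]
    have hd' : ∀ x, (pvRootStep g H W d c).get? x =
        if x ∈ P ++ [c] then some (pvRoot g H W x) else none := by
      intro x
      rw [hval, PySem.Dict.get?_insert]
      by_cases hx : x = c
      · subst hx; simp
      · rw [if_neg hx, hd x]
        by_cases hxP : x ∈ P
        · rw [if_pos hxP, if_pos (List.mem_append_left _ hxP)]
        · rw [if_neg hxP, if_neg (by simp [hxP, hx])]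
    have hsplit' : pvCellsSorted g H W = (P ++ [c]) ++ Q := by
      rw [hsplit, List.append_assoc]; rfl
    intro x
    rw [List.foldl_cons]
    rw [ih (P ++ [c]) (pvRootStep g H W d c) hsplit' hd' x]
    by_cases hx : x ∈ (P ++ [c]) ++ Q
    · rw [if_pos hx, if_pos (by simpa [List.mem_append, or_assoc] using hx)]
    · rw [if_neg hx, if_neg (by simpa [List.mem_append, or_assoc] using hx)]

theorem pvRootD_getD (g : List (List Int)) (H W : Int) {c : Int × Int}
    (h : pvInbP H W c) : (pvRootD g H W).getD c c = pvRoot g H W c := by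
  have hmem : c ∈ pvCellsSorted g H W := by
    rw [pvCellsSorted, PySem.List.mem_sorted]
    exact (pvMem_cells H W c).mpr h
  have := pvRootFold_seg g H W (pvCellsSorted g H W) [] PySem.Dict.empty (by simp)
    (by intro x; simp [PySem.Dict.get?_empty]) c
  rw [List.nil_append, if_pos hmem] at this
  unfold pvRootD
  rw [PySem.Dict.getD_eq_get?_getD, this, Option.getD_some]

-- ---------- the B side: the second, row-major letter pass ----------

theorem pvDict_size_keys {κ ν : Type} [BEq κ] (d : PySem.Dict κ ν) :
    PySem.Dict.size d = d.keys.length := by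
  simp [PySem.Dict.size, PySem.Dict.keys]

-- the ledger of letters handed out so far
def pvAssignedOK (g : List (List Int)) (H W : Int) (P : List (Int × Int))
    (assigned : PySem.Dict (Int × Int) String) : Prop :=
  assigned.keys = PySem.List.dedup (P.map (pvRoot g H W)) ∧
  (∀ r s, assigned.get? r = some s →
    s = pvAlphabet.getD ((PySem.List.index? (pvRoots g H W) r).getD 0) "")

-- one cell of Source B's second pass
theorem pvStepB_assigned (g : List (List Int)) (H W : Int) {P : List (Int × Int)}
    {c : Int × Int} (hP : P ++ [c] <+: pvCells H W)
    {assigned : PySem.Dict (Int × Int) String} (ha : pvAssignedOK g H W P assigned) :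
    pvAssignedOK g H W (P ++ [c])
      (if assigned.contains (pvRoot g H W c) then assigned
       else assigned.insert (pvRoot g H W c)
         ((PySem.List.pyGet? pvAlphabet (PySem.Dict.size assigned)).getD "")) ∧
    (if assigned.contains (pvRoot g H W c) then assigned
       else assigned.insert (pvRoot g H W c)
         ((PySem.List.pyGet? pvAlphabet (PySem.Dict.size assigned)).getD "")).getD
        (pvRoot g H W c) "" = pvLabelOf g H W c := by
  obtain ⟨hkeys, hget⟩ := ha
  by_cases hc : assigned.contains (pvRoot g H W c) = true
  · rw [if_pos hc]
    have hmem : pvRoot g H W c ∈ PySem.List.dedup (P.map (pvRoot g H W)) := by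
      rw [← hkeys]; exact (PySem.Dict.contains_iff_mem_keys _ _).mp hc
    refine ⟨⟨?_, hget⟩, ?_⟩
    · rw [hkeys, List.map_append, List.map_singleton, pvDedup_append_mem hmem]
    · have hsome : (assigned.get? (pvRoot g H W c)).isSome := by
        rw [← PySem.Dict.contains_eq_isSome_get?]; exact hc
      obtain ⟨s, hs⟩ := Option.isSome_iff_exists.mp hsome
      rw [PySem.Dict.getD_eq_get?_getD, hs, Option.getD_some, hget _ _ hs]
      rfl
  · rw [Bool.not_eq_true] at hc
    rw [if_neg (by simp [hc])]
    have hfr : ¬ pvRoot g H W c ∈ PySem.List.dedup (P.map (pvRoot g H W)) := by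
      rw [← hkeys]
      intro hmem
      rw [← PySem.Dict.contains_iff_mem_keys] at hmem
      rw [hc] at hmem; simp at hmem
    have hidx := pvIndex_fresh (g := g) hP hfr
    have hval : ((PySem.List.pyGet? pvAlphabet (PySem.Dict.size assigned)).getD "") =
        pvAlphabet.getD (PySem.List.dedup (P.map (pvRoot g H W))).length "" := by
      rw [pvDict_size_keys, hkeys, PySem.List.pyGet?_natCast]
      rw [List.getD_eq_getElem?_getD]
    refine ⟨⟨?_, ?_⟩, ?_⟩
    · rw [PySem.Dict.keys_insert_of_not_contains _ _ hc, hkeys,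
        List.map_append, List.map_singleton, pvDedup_append_fresh hfr]
    · intro r s hs
      rw [PySem.Dict.get?_insert] at hs
      split_ifs at hs with h
      · subst h
        rw [Option.some_inj] at hs
        rw [← hs, hval, hidx, Option.getD_some]
      · exact hget _ _ hs
    · rw [PySem.Dict.getD_insert_self, hval]
      unfold pvLabelOf
      rw [hidx, Option.getD_some]

def pvRowCells (W i : Int) : List (Int × Int) :=
  (PySem.List.pyRange 0 W 1).map (fun j => (i, j))

-- the body of Source B's inner loop, as a step function on (assigned, row)
def pvStepBF (g : List (List Int)) (H W : Int)
    (st2 : PySem.Dict (Int × Int) String × List String) (c : Int × Int) :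
    PySem.Dict (Int × Int) String × List String :=
  let r := (pvRootD g H W).getD c c
  let assigned := if st2.1.contains r then st2.1
    else st2.1.insert r ((PySem.List.pyGet? pvAlphabet (PySem.Dict.size st2.1)).getD "")
  (assigned, st2.2 ++ [assigned.getD r ""])

theorem pvStepBF_spec (g : List (List Int)) (H W : Int) {P : List (Int × Int)} {c : Int × Int}
    (hP : P ++ [c] <+: pvCells H W)
    (st2 : PySem.Dict (Int × Int) String × List String)
    (ha : pvAssignedOK g H W P st2.1) :
    pvAssignedOK g H W (P ++ [c]) (pvStepBF g H W st2 c).1 ∧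
    (pvStepBF g H W st2 c).2 = st2.2 ++ [pvLabelOf g H W c] := by
  have hcmem : c ∈ pvCells H W := hP.subset (by simp)
  have hin : pvInbP H W c := (pvMem_cells H W c).mp hcmem
  unfold pvStepBF
  simp only [pvRootD_getD g H W hin]
  obtain ⟨ha', hlab⟩ := pvStepB_assigned g H W hP ha
  exact ⟨ha', by rw [hlab]⟩

theorem pvFoldBF_seg (g : List (List Int)) (H W : Int) :
    ∀ (Q P : List (Int × Int)) (st2 : PySem.Dict (Int × Int) String × List String),
      P ++ Q <+: pvCells H W → pvAssignedOK g H W P st2.1 →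
      pvAssignedOK g H W (P ++ Q) (Q.foldl (pvStepBF g H W) st2).1 ∧
      (Q.foldl (pvStepBF g H W) st2).2 = st2.2 ++ Q.map (pvLabelOf g H W) := by
  intro Q
  induction Q with
  | nil =>
    intro P st2 hpre ha
    simpa using ha
  | cons c Q ih =>
    intro P st2 hpre ha
    have hP1 : P ++ [c] <+: pvCells H W := by
      refine List.IsPrefix.trans ⟨Q, ?_⟩ hpre
      simp
    obtain ⟨ha', hrow⟩ := pvStepBF_spec g H W hP1 st2 ha
    have hpre' : (P ++ [c]) ++ Q <+: pvCells H W := by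
      rw [List.append_assoc]; simpa using hpre
    obtain ⟨ha2, hrows2⟩ := ih (P ++ [c]) (pvStepBF g H W st2 c) hpre' ha'
    rw [List.foldl_cons]
    refine ⟨by simpa using ha2, ?_⟩
    rw [hrows2, hrow]
    simp

def pvOuterBF (g : List (List Int)) (H W : Int)
    (st : PySem.Dict (Int × Int) String × List (List String)) (i : Int) :
    PySem.Dict (Int × Int) String × List (List String) :=
  (((pvRowCells W i).foldl (pvStepBF g H W) (st.1, ([] : List String))).1,
   st.2 ++ [((pvRowCells W i).foldl (pvStepBF g H W) (st.1, ([] : List String))).2])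

theorem pvFoldB_rows (g : List (List Int)) (H W : Int) :
    ∀ (L2 L1 : List Int) (st : PySem.Dict (Int × Int) String × List (List String)),
      PySem.List.pyRange 0 H 1 = L1 ++ L2 →
      pvAssignedOK g H W (L1.flatMap (pvRowCells W)) st.1 →
      (L2.foldl (pvOuterBF g H W) st).2 =
      st.2 ++ L2.map (fun i => (pvRowCells W i).map (pvLabelOf g H W)) := by
  intro L2
  induction L2 with
  | nil => intro L1 st _ _; simp
  | cons i L2 ih =>
    intro L1 st hsplit ha
    have hcells : pvCells H W = (L1.flatMap (pvRowCells W) ++ pvRowCells W i) ++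
        L2.flatMap (pvRowCells W) := by
      unfold pvCells
      rw [hsplit, List.flatMap_append, List.flatMap_cons]
      rw [List.append_assoc]
      rfl
    have hpre : L1.flatMap (pvRowCells W) ++ pvRowCells W i <+: pvCells H W := by
      rw [hcells]; exact ⟨_, rfl⟩
    obtain ⟨ha', hrow⟩ :=
      pvFoldBF_seg g H W (pvRowCells W i) (L1.flatMap (pvRowCells W))
        (st.1, ([] : List String)) hpre ha
    rw [List.foldl_cons]
    have hsplit' : PySem.List.pyRange 0 H 1 = (L1 ++ [i]) ++ L2 := by
      rw [hsplit, List.append_assoc]; rfl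
    have ha'' : pvAssignedOK g H W ((L1 ++ [i]).flatMap (pvRowCells W))
        (pvOuterBF g H W st i).1 := by
      rw [List.flatMap_append, List.flatMap_singleton]; exact ha'
    rw [ih (L1 ++ [i]) _ hsplit' ha'']
    have h22 : (pvOuterBF g H W st i).2 =
        st.2 ++ [(pvRowCells W i).map (pvLabelOf g H W)] := by
      unfold pvOuterBF
      rw [hrow]
      simp
    rw [h22, List.map_cons]
    simp

theorem pvAltB_main (g : List (List Int)) (H W : Int) :
    solve_case_alt (H, W, g) = pvSpecGrid g H W := by
  simp only [solve_case_alt]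
  have hcells : PySem.List.sorted
      ((PySem.List.pyRange 0 H 1).flatMap (fun i =>
        (PySem.List.pyRange 0 W 1).map (fun j => (i, j))))
      (fun c => pvAlt g c.1 c.2) = pvCellsSorted g H W := rfl
  rw [hcells]
  have hroot : (pvCellsSorted g H W).foldl (fun d c =>
      match pvParentOf g H W c.1 c.2 with
      | none => d.insert c c
      | some p => d.insert c (d.getD p c))
      (PySem.Dict.empty : PySem.Dict (Int × Int) (Int × Int)) = pvRootD g H W := rfl
  rw [hroot]
  have hrowfold : ∀ (st : PySem.Dict (Int × Int) String × List (List String)) (i : Int),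
      (PySem.List.pyRange 0 W 1).foldl (fun st2 j =>
        let r := (pvRootD g H W).getD (i, j) (i, j)
        let assigned := if st2.1.contains r then st2.1
          else st2.1.insert r ((PySem.List.pyGet? pvAlphabet (PySem.Dict.size st2.1)).getD "")
        (assigned, st2.2 ++ [assigned.getD r ""])) (st.1, ([] : List String)) =
      (pvRowCells W i).foldl (pvStepBF g H W) (st.1, ([] : List String)) := by
    intro st i
    rw [pvRowCells, List.foldl_map]
    rfl
  simp only [hrowfold]
  have houter : (fun (st : PySem.Dict (Int × Int) String × List (List String)) (i : Int) =>
      ((((pvRowCells W i).foldl (pvStepBF g H W) (st.1, ([] : List String)))).1,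
       st.2 ++ [(((pvRowCells W i).foldl (pvStepBF g H W) (st.1, ([] : List String)))).2])) =
      pvOuterBF g H W := by
    funext st i; rfl
  rw [houter]
  have hmain := pvFoldB_rows g H W (PySem.List.pyRange 0 H 1) []
    ((PySem.Dict.empty : PySem.Dict (Int × Int) String), ([] : List (List String)))
    (by simp)
    (by
      constructor
      · simp [PySem.Dict.keys_empty]
      · intro r s h
        rw [PySem.Dict.get?_empty] at h; cases h)
  rw [hmain]
  unfold pvSpecGrid
  rw [List.nil_append]
  apply List.map_congr_left
  intro i _
  rw [pvRowCells, List.map_map]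
  rfl

-- ---------- the A side: labels grid, the steepest-descent walk ----------

def pvShapeOK (H W : Int) (labels : List (List (Option String))) : Prop :=
  labels.length = H.toNat ∧ ∀ row ∈ labels, row.length = W.toNat

theorem pvGetD_replicate_none (n : Nat) (j : Int) :
    PySem.List.pyGetD (List.replicate n (none : Option String)) j none = none := by
  by_cases h : PySem.Raise.InRange (List.replicate n (none : Option String)).length j
  · exact List.eq_of_mem_replicate
      (PySem.List.pyGetD_mem (List.replicate n (none : Option String)) none h)
  · exact PySem.List.pyGetD_of_none _ _ _ ((PySem.List.pyGet?_eq_none_iff _ _).mpr h)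

theorem pvLabelAt_natCast (labels : List (List (Option String))) (i j : Nat) :
    pvLabelAt labels ((i : Int), (j : Int)) = (labels.getD i []).getD j none := by
  unfold pvLabelAt
  rw [PySem.List.pyGetD_natCast, PySem.List.pyGetD_natCast]

-- write labels[c] = s and read back
theorem pvSetLabel_shape (H W : Int) {labels : List (List (Option String))}
    (hs : pvShapeOK H W labels) {c : Int × Int} (hin : pvInbP H W c) (s : String) :
    pvShapeOK H W (pvSetLabel labels c s) := by
  obtain ⟨h1, h2, h3, h4⟩ := hin
  have ha : c.1.toNat < labels.length := by rw [hs.1]; omega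
  have hrowmem : PySem.List.pyGetD labels c.1 [] ∈ labels := by
    apply PySem.List.pyGetD_mem labels []
    unfold PySem.Raise.InRange
    rw [hs.1]
    omega
  unfold pvSetLabel
  rw [PySem.List.pySetD_of_nonneg labels _ h1]
  constructor
  · rw [List.length_set]; exact hs.1
  · intro row hrow
    rcases List.mem_or_eq_of_mem_set hrow with h | h
    · exact hs.2 _ h
    · subst h
      rw [PySem.List.length_pySetD]
      exact hs.2 _ hrowmem

theorem pvLabelAt_setLabel (H W : Int) {labels : List (List (Option String))}
    (hs : pvShapeOK H W labels) {c : Int × Int} (hin : pvInbP H W c) (s : String)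
    {c' : Int × Int} (hin' : pvInbP H W c') :
    pvLabelAt (pvSetLabel labels c s) c' =
      if c' = c then some s else pvLabelAt labels c' := by
  obtain ⟨h1, h2, h3, h4⟩ := hin
  obtain ⟨h1', h2', h3', h4'⟩ := hin'
  have ha : c.1.toNat < labels.length := by rw [hs.1]; omega
  have hrowlen : (PySem.List.pyGetD labels c.1 [] : List (Option String)).length = W.toNat := by
    apply hs.2
    apply PySem.List.pyGetD_mem labels []
    unfold PySem.Raise.InRange
    rw [hs.1]
    omega
  have hb : c.2.toNat < (PySem.List.pyGetD labels c.1 [] : List (Option String)).length := by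
    rw [hrowlen]; omega
  unfold pvSetLabel pvLabelAt
  rw [show c.1 = ((c.1.toNat : Nat) : Int) by omega, show c.2 = ((c.2.toNat : Nat) : Int) by omega,
    show c'.1 = ((c'.1.toNat : Nat) : Int) by omega, show c'.2 = ((c'.2.toNat : Nat) : Int) by omega]
  rw [show c.1 = ((c.1.toNat : Nat) : Int) by omega] at hb
  rw [PySem.List.pyGetD_pySetD_natCast _ _ _ _ _ ha]
  have hcc : (c' = c) ↔ (c'.1.toNat = c.1.toNat ∧ c'.2.toNat = c.2.toNat) := by
    rw [Prod.ext_iff]; omega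
  by_cases hA : c'.1.toNat = c.1.toNat
  · rw [if_pos hA]
    rw [PySem.List.pyGetD_pySetD_natCast _ _ _ _ _ hb]
    by_cases hB : c'.2.toNat = c.2.toNat
    · rw [if_pos hB, if_pos (hcc.mpr ⟨hA, hB⟩)]
    · rw [if_neg hB, if_neg (fun h => hB (hcc.mp h).2), hA]
  · rw [if_neg hA, if_neg (fun h => hA (hcc.mp h).1)]

-- writing one symbol along a list of in-bounds cells
theorem pvWriteExt (H W : Int) (s : String) :
    ∀ (ext : List (Int × Int)) (labels : List (List (Option String))),
      pvShapeOK H W labels → (∀ t ∈ ext, pvInbP H W t) →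
      pvShapeOK H W (ext.foldl (fun L p => pvSetLabel L p s) labels) ∧
      (∀ c', pvInbP H W c' →
        pvLabelAt (ext.foldl (fun L p => pvSetLabel L p s) labels) c' =
          if c' ∈ ext then some s else pvLabelAt labels c') := by
  intro ext
  induction ext with
  | nil => intro labels hs _; exact ⟨hs, fun c' _ => by simp⟩
  | cons t ext ih =>
    intro labels hs hall
    have hint : pvInbP H W t := hall t (by simp)
    have hs' := pvSetLabel_shape H W hs hint s
    obtain ⟨hsh, hread⟩ := ih (pvSetLabel labels t s) hs' (fun x hx => hall x (by simp [hx]))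
    refine ⟨hsh, fun c' hin' => ?_⟩
    rw [List.foldl_cons, hread c' hin']
    rw [pvLabelAt_setLabel H W hs hint s hin']
    by_cases h1 : c' ∈ ext
    · rw [if_pos h1, if_pos (by simp [h1])]
    · rw [if_neg h1]
      by_cases h2 : c' = t
      · rw [if_pos h2, if_pos (by simp [h2])]
      · rw [if_neg h2, if_neg (by simp [h1, h2])]

-- A's neighbour set holds exactly the candidate cells
theorem pvNbA_mem (g : List (List Int)) (H W i j : Int) (x : Int × Int) :
    x ∈ (pvDirs.foldl (fun s d =>
        if decide (0 ≤ i + d.1 ∧ i + d.1 < H ∧ 0 ≤ j + d.2 ∧ j + d.2 < W) &&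
           decide (pvAlt g (i + d.1) (j + d.2) < pvAlt g i j)
        then PySem.Set.add s (i + d.1, j + d.2) else s)
        (PySem.Set.empty : PySem.Set (Int × Int))) ↔
      x ∈ pvNbrs g H W (i, j) := by
  rw [pvMem_setfold pvDirs
    (fun d => decide (0 ≤ i + d.1 ∧ i + d.1 < H ∧ 0 ≤ j + d.2 ∧ j + d.2 < W) &&
       decide (pvAlt g (i + d.1) (j + d.2) < pvAlt g i j))
    (fun d => (i + d.1, j + d.2)) PySem.Set.empty x]
  rw [pvMem_nbrs]
  constructor
  · rintro (hs | ⟨d, hd, hP, rfl⟩)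
    · cases hs
    · simp only [Bool.and_eq_true, decide_eq_true_eq] at hP
      exact ⟨⟨d, hd, rfl⟩, hP.1, hP.2⟩
  · rintro ⟨⟨d, hd, rfl⟩, hin, hlt⟩
    refine Or.inr ⟨d, hd, ?_, rfl⟩
    simp only [Bool.and_eq_true, decide_eq_true_eq]
    exact ⟨hin, hlt⟩

-- one iteration of A's `while True` loop, in terms of the flow structure
theorem pvWalkA_succ (g : List (List Int)) (H W : Int) (fuel : Nat)
    (labels : List (List (Option String))) (symbols : List String) (i j : Int)
    (path : List (Int × Int)) :
    pvWalkA g H W (fuel + 1) labels symbols i j path =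
      match pvLabelAt labels (i, j) with
      | some s => (s, path, symbols)
      | none =>
        match pvParentOf g H W i j with
        | some p => pvWalkA g H W fuel labels symbols p.1 p.2 (path ++ [(i, j)])
        | none =>
          match PySem.List.pop? symbols (-1) with
          | some r => (r.1, path ++ [(i, j)], r.2)
          | none => ("", path ++ [(i, j)], symbols) := by
  show (match pvLabelAt labels (i, j) with
    | some s => (s, path, symbols)
    | none =>
      let path' := path ++ [(i, j)]
      let nb : PySem.Set (Int × Int) := pvDirs.foldl (fun (s : PySem.Set (Int × Int)) (d : Int × Int) =>
        if decide (0 ≤ i + d.1 ∧ i + d.1 < H ∧ 0 ≤ j + d.2 ∧ j + d.2 < W) &&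
           decide (pvAlt g (i + d.1) (j + d.2) < pvAlt g i j)
        then PySem.Set.add s (i + d.1, j + d.2) else s) PySem.Set.empty
      if nb.isEmpty then
        match PySem.List.pop? symbols (-1) with
        | some r => (r.1, path', r.2)
        | none => ("", path', symbols)
      else
        match pvMinKeyA g nb with
        | some p => pvWalkA g H W fuel labels symbols p.1 p.2 path'
        | none => ("", path', symbols)) = _
  cases hl : pvLabelAt labels (i, j) with
  | some s => rfl
  | none =>
    simp only []
    set nb := pvDirs.foldl (fun (s : PySem.Set (Int × Int)) (d : Int × Int) =>
        if decide (0 ≤ i + d.1 ∧ i + d.1 < H ∧ 0 ≤ j + d.2 ∧ j + d.2 < W) &&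
           decide (pvAlt g (i + d.1) (j + d.2) < pvAlt g i j)
        then PySem.Set.add s (i + d.1, j + d.2) else s)
        (PySem.Set.empty : PySem.Set (Int × Int)) with hnb
    cases hp : pvParentOf g H W i j with
    | none =>
      have hnil : pvNbrs g H W (i, j) = [] := (pvParentOf_none_iff g H W i j).mp hp
      have hempty : nb = [] := by
        rw [List.eq_nil_iff_forall_not_mem]
        intro x hx
        rw [hnb] at hx
        have := (pvNbA_mem g H W i j x).mp hx
        rw [hnil] at this
        cases this
      rw [hempty]
      rfl
    | some p =>
      have hne : pvNbrs g H W (i, j) ≠ [] := by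
        intro hc
        rw [(pvParentOf_none_iff g H W i j).mpr hc] at hp
        cases hp
      have hnbne : nb ≠ [] := by
        intro hc
        obtain ⟨x, hx⟩ := List.exists_mem_of_ne_nil _ hne
        have := (pvNbA_mem g H W i j x).mpr hx
        rw [← hnb, hc] at this
        cases this
      have hie : nb.isEmpty = false := by
        rw [List.isEmpty_eq_false_iff]; exact hnbne
      rw [hie]
      simp only [Bool.false_eq_true, if_false]
      obtain ⟨r, hr, hrmem, hrmin⟩ := pvMinKeyA_spec g hnbne
      have hspec := pvParentOf_spec g H W i j hp
      have hreq : r = p := by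
        rw [hnb] at hrmem hrmin
        refine pvMin_unique g ((pvNbA_mem g H W i j r).mp hrmem) ?_ hspec.1 hspec.2
        intro y hy
        exact hrmin y ((pvNbA_mem g H W i j y).mpr hy)
      rw [hr, hreq]

theorem pvPop_take : ∀ k : Nat, k < 26 →
    PySem.List.pop? (pvAlphabet.reverse.take (26 - k)) (-1) =
      some (pvAlphabet.getD k "", pvAlphabet.reverse.take (26 - (k + 1))) := by decide

theorem pvLabelOf_root_eq (g : List (List Int)) (H W : Int) {c c' : Int × Int}
    (h : pvRoot g H W c = pvRoot g H W c') : pvLabelOf g H W c = pvLabelOf g H W c' := by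
  unfold pvLabelOf; rw [h]

-- the whole walk from c: it returns c's basin letter, visits only unlabelled cells of c's
-- basin, and pops a fresh letter exactly when c's basin has no letter yet
theorem pvWalkA_spec (g : List (List Int)) (H W : Int) (R : List (Int × Int))
    (hS : (pvRoots g H W).length ≤ 26)
    (labels : List (List (Option String))) (symbols : List String)
    (hs : pvShapeOK H W labels)
    (hI1 : ∀ c, pvInbP H W c → ∀ s, pvLabelAt labels c = some s →
        pvRoot g H W c ∈ R ∧ s = pvLabelOf g H W c)
    (hI2 : ∀ r ∈ R, pvLabelAt labels r ≠ none)
    (hsym : symbols = pvAlphabet.reverse.take (26 - R.length)) :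
    ∀ (fuel : Nat) (c : Int × Int) (path : List (Int × Int)),
      pvInbP H W c → pvRank g H W c < fuel →
      (¬ pvRoot g H W c ∈ R →
        PySem.List.index? (pvRoots g H W) (pvRoot g H W c) = some R.length) →
      ∃ ext symbols',
        pvWalkA g H W fuel labels symbols c.1 c.2 path =
          (pvLabelOf g H W c, path ++ ext, symbols') ∧
        (∀ t ∈ ext, pvInbP H W t ∧ pvRoot g H W t = pvRoot g H W c ∧
          pvLabelAt labels t = none) ∧
        (pvLabelAt labels c ≠ none ∨ c ∈ ext) ∧
        ((pvRoot g H W c ∈ R ∧ symbols' = symbols) ∨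
         (¬ pvRoot g H W c ∈ R ∧ pvRoot g H W c ∈ ext ∧
          symbols' = pvAlphabet.reverse.take (26 - (R.length + 1)))) := by
  intro fuel
  induction fuel with
  | zero => intro c path _ h _; omega
  | succ fuel ih =>
    intro c path hin hrk hfr
    rw [show pvWalkA g H W (fuel + 1) labels symbols c.1 c.2 path =
      pvWalkA g H W (fuel + 1) labels symbols c.1 c.2 path from rfl, pvWalkA_succ]
    have heta : ((c.1 : Int), (c.2 : Int)) = c := rfl
    rw [heta]
    cases hl : pvLabelAt labels c with
    | some s =>
      obtain ⟨hmemR, hseq⟩ := hI1 c hin s hl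
      refine ⟨[], symbols, ?_, by simp, Or.inl (by simp), Or.inl ⟨hmemR, rfl⟩⟩
      rw [List.append_nil, hseq]
    | none =>
      cases hp : pvParentOf g H W c.1 c.2 with
      | some c' =>
        have hin' := (pvParentOf_lower g H W hp).1
        have hrk' := pvRank_lt g H W hp
        have hrooteq := pvRoot_step g H W hp
        obtain ⟨ext', symbols', heq, hall, _, hdisj⟩ :=
          ih c' (path ++ [c]) hin' (by omega) (fun hh => by
            rw [← hrooteq]
            exact hfr (by rw [hrooteq]; exact hh))
        refine ⟨c :: ext', symbols', ?_, ?_, Or.inr (by simp), ?_⟩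
        · show pvWalkA g H W fuel labels symbols c'.1 c'.2 (path ++ [c]) =
            (pvLabelOf g H W c, path ++ c :: ext', symbols')
          rw [heq, pvLabelOf_root_eq g H W hrooteq]
          simp
        · intro t ht
          rcases List.mem_cons.mp ht with rfl | ht
          · exact ⟨hin, rfl, hl⟩
          · obtain ⟨ha1, ha2, ha3⟩ := hall t ht
            exact ⟨ha1, by rw [ha2, ← hrooteq], ha3⟩
        · rcases hdisj with ⟨hmem, hsym'⟩ | ⟨hmem, hext, hsym'⟩
          · exact Or.inl ⟨by rw [hrooteq]; exact hmem, hsym'⟩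
          · exact Or.inr ⟨by rw [hrooteq]; exact hmem, by rw [hrooteq]; simp [hext], hsym'⟩
      | none =>
        have hroot : pvRoot g H W c = c := pvRoot_of_sink g H W hp
        have hmem : ¬ pvRoot g H W c ∈ R := by
          intro hmem
          exact hI2 _ hmem (by rw [hroot]; exact hl)
        have hidx := hfr hmem
        have hlt26 : R.length < 26 := by
          obtain ⟨pre, suf, hrs, hlen, -⟩ := (PySem.List.index?_eq_some_iff _ _ _).mp hidx
          have : (pvRoots g H W).length = pre.length + suf.length + 1 := by
            rw [hrs]; simp; omega
          omega
        rw [hsym, pvPop_take R.length hlt26]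
        have hlab : pvLabelOf g H W c = pvAlphabet.getD R.length "" := by
          unfold pvLabelOf
          rw [hidx, Option.getD_some]
        refine ⟨[c], pvAlphabet.reverse.take (26 - (R.length + 1)), ?_, ?_,
          Or.inr (by simp), ?_⟩
        · rw [hlab]
        · intro t ht
          rcases List.mem_cons.mp ht with rfl | ht
          · exact ⟨hin, rfl, hl⟩
          · cases ht
        · exact Or.inr ⟨hmem, by rw [hroot]; simp, rfl⟩

-- the loop invariant of A's outer double loop, for a processed prefix P of the cells
def pvInvA (g : List (List Int)) (H W : Int) (P : List (Int × Int))
    (labels : List (List (Option String))) (symbols : List String) : Prop :=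
  pvShapeOK H W labels ∧
  (∀ c, pvInbP H W c → ∀ s, pvLabelAt labels c = some s →
    pvRoot g H W c ∈ PySem.List.dedup (P.map (pvRoot g H W)) ∧ s = pvLabelOf g H W c) ∧
  (∀ r ∈ PySem.List.dedup (P.map (pvRoot g H W)), pvLabelAt labels r ≠ none) ∧
  (∀ c ∈ P, pvLabelAt labels c ≠ none) ∧
  symbols = pvAlphabet.reverse.take
    (26 - (PySem.List.dedup (P.map (pvRoot g H W))).length)

-- A's per-cell body, as a step function on (labels, symbols)
def pvStepAF (g : List (List Int)) (H W : Int)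
    (st : List (List (Option String)) × List String) (c : Int × Int) :
    List (List (Option String)) × List String :=
  ((pvWalkA g H W (H.toNat * W.toNat + 1) st.1 st.2 c.1 c.2 []).2.1.foldl
     (fun L p => pvSetLabel L p
       (pvWalkA g H W (H.toNat * W.toNat + 1) st.1 st.2 c.1 c.2 []).1) st.1,
   (pvWalkA g H W (H.toNat * W.toNat + 1) st.1 st.2 c.1 c.2 []).2.2)

theorem pvR_inb (g : List (List Int)) (H W : Int) {P : List (Int × Int)}
    (hP : P <+: pvCells H W) :
    ∀ r ∈ PySem.List.dedup (P.map (pvRoot g H W)), pvInbP H W r := by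
  intro r hr
  rw [PySem.List.mem_dedup] at hr
  obtain ⟨p, hp, rfl⟩ := List.mem_map.mp hr
  exact pvRoot_inb g H W ((pvMem_cells H W p).mp (hP.subset hp))

theorem pvStepAF_spec (g : List (List Int)) (H W : Int)
    (hS : (pvRoots g H W).length ≤ 26) {P : List (Int × Int)} {c : Int × Int}
    (hP : P ++ [c] <+: pvCells H W) (st : List (List (Option String)) × List String)
    (hinv : pvInvA g H W P st.1 st.2) :
    pvInvA g H W (P ++ [c]) (pvStepAF g H W st c).1 (pvStepAF g H W st c).2 := by
  obtain ⟨hs, hI1, hI2, hI3, hsym⟩ := hinv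
  have hPpre : P <+: pvCells H W := (List.prefix_append P [c]).trans hP
  have hcmem : c ∈ pvCells H W := hP.subset (by simp)
  have hin : pvInbP H W c := (pvMem_cells H W c).mp hcmem
  have hrk : pvRank g H W c < H.toNat * W.toNat + 1 := by
    have := pvRank_le g H W c; omega
  have hfr := pvIndex_fresh (g := g) hP
  obtain ⟨ext, symbols', heq, hall, hcov, hdisj⟩ :=
    pvWalkA_spec g H W (PySem.List.dedup (P.map (pvRoot g H W))) hS st.1 st.2 hs hI1 hI2 hsym
      (H.toNat * W.toNat + 1) c [] hin hrk hfr
  have hstep : pvStepAF g H W st c =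
      (ext.foldl (fun L p => pvSetLabel L p (pvLabelOf g H W c)) st.1, symbols') := by
    unfold pvStepAF
    rw [heq]
    simp
  rw [hstep]
  obtain ⟨hsh', hread⟩ := pvWriteExt H W (pvLabelOf g H W c) ext st.1 hs
    (fun t ht => (hall t ht).1)
  have hRinb := pvR_inb g H W hPpre
  rcases hdisj with ⟨hmemR, hsymkeep⟩ | ⟨hnmem, hextmem, hsymnew⟩
  · have hR' : PySem.List.dedup (((P ++ [c]).map (pvRoot g H W))) =
        PySem.List.dedup (P.map (pvRoot g H W)) := by
      rw [List.map_append, List.map_singleton, pvDedup_append_mem hmemR]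
    refine ⟨hsh', ?_, ?_, ?_, ?_⟩
    · intro c' hin' s hls
      rw [hread c' hin'] at hls
      rw [hR']
      split_ifs at hls with hx
      · obtain ⟨-, hroot', -⟩ := hall c' hx
        rw [Option.some_inj] at hls
        refine ⟨by rw [hroot']; exact hmemR, ?_⟩
        rw [← hls]
        exact (pvLabelOf_root_eq g H W hroot').symm
      · exact hI1 c' hin' s hls
    · intro r hr
      rw [hR'] at hr
      rw [hread r (hRinb r hr)]
      split_ifs with hx
      · simp
      · exact hI2 r hr
    · intro c'' hc''
      rcases List.mem_append.mp hc'' with hmem | hmem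
      · rw [hread c'' ((pvMem_cells H W c'').mp (hPpre.subset hmem))]
        split_ifs with hx
        · simp
        · exact hI3 c'' hmem
      · rw [List.mem_singleton] at hmem
        subst hmem
        rw [hread c'' hin]
        split_ifs with hx
        · simp
        · rcases hcov with h | h
          · exact h
          · exact absurd h hx
    · rw [hsymkeep, hsym, hR']
  · have hR' : PySem.List.dedup (((P ++ [c]).map (pvRoot g H W))) =
        PySem.List.dedup (P.map (pvRoot g H W)) ++ [pvRoot g H W c] := by
      rw [List.map_append, List.map_singleton, pvDedup_append_fresh hnmem]
    refine ⟨hsh', ?_, ?_, ?_, ?_⟩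
    · intro c' hin' s hls
      rw [hread c' hin'] at hls
      rw [hR']
      split_ifs at hls with hx
      · obtain ⟨-, hroot', -⟩ := hall c' hx
        rw [Option.some_inj] at hls
        refine ⟨by rw [hroot']; simp, ?_⟩
        rw [← hls]
        exact (pvLabelOf_root_eq g H W hroot').symm
      · obtain ⟨hm, hv⟩ := hI1 c' hin' s hls
        exact ⟨List.mem_append_left _ hm, hv⟩
    · intro r hr
      rw [hR'] at hr
      rcases List.mem_append.mp hr with hr | hr
      · rw [hread r (hRinb r hr)]
        split_ifs with hx
        · simp
        · exact hI2 r hr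
      · rw [List.mem_singleton] at hr
        subst hr
        rw [hread _ (pvRoot_inb g H W hin)]
        rw [if_pos hextmem]
        simp
    · intro c'' hc''
      rcases List.mem_append.mp hc'' with hmem | hmem
      · rw [hread c'' ((pvMem_cells H W c'').mp (hPpre.subset hmem))]
        split_ifs with hx
        · simp
        · exact hI3 c'' hmem
      · rw [List.mem_singleton] at hmem
        subst hmem
        rw [hread c'' hin]
        split_ifs with hx
        · simp
        · rcases hcov with h | h
          · exact h
          · exact absurd h hx
    · rw [hsymnew, hR', List.length_append, List.length_singleton]

theorem pvFoldA_seg (g : List (List Int)) (H W : Int)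
    (hS : (pvRoots g H W).length ≤ 26) :
    ∀ (Q P : List (Int × Int)) (st : List (List (Option String)) × List String),
      P ++ Q <+: pvCells H W → pvInvA g H W P st.1 st.2 →
      pvInvA g H W (P ++ Q) (Q.foldl (pvStepAF g H W) st).1 (Q.foldl (pvStepAF g H W) st).2 := by
  intro Q
  induction Q with
  | nil => intro P st _ hinv; simpa using hinv
  | cons c Q ih =>
    intro P st hpre hinv
    have hP1 : P ++ [c] <+: pvCells H W := by
      refine List.IsPrefix.trans ⟨Q, ?_⟩ hpre
      simp
    have hinv' := pvStepAF_spec g H W hS hP1 st hinv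
    have hpre' : (P ++ [c]) ++ Q <+: pvCells H W := by
      rw [List.append_assoc]; simpa using hpre
    have := ih (P ++ [c]) (pvStepAF g H W st c) hpre' hinv'
    rw [List.foldl_cons]
    simpa using this

theorem pvLabelAt_init (H W : Int) (c : Int × Int) :
    pvLabelAt ((PySem.List.pyRange 0 H 1).map
      (fun _ => List.replicate W.toNat (none : Option String))) c = none := by
  unfold pvLabelAt
  by_cases h : PySem.Raise.InRange ((PySem.List.pyRange 0 H 1).map
      (fun _ => List.replicate W.toNat (none : Option String))).length c.1
  · have hmem := PySem.List.pyGetD_mem ((PySem.List.pyRange 0 H 1).map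
      (fun _ => List.replicate W.toNat (none : Option String))) ([] : List (Option String)) h
    obtain ⟨-, -, hrow⟩ := List.mem_map.mp hmem
    rw [← hrow]
    exact pvGetD_replicate_none W.toNat c.2
  · rw [PySem.List.pyGetD_of_none _ _ _ ((PySem.List.pyGet?_eq_none_iff _ _).mpr h)]
    exact pvGetD_replicate_none 0 c.2

theorem pvInvA_init (g : List (List Int)) (H W : Int) :
    pvInvA g H W [] ((PySem.List.pyRange 0 H 1).map
      (fun _ => List.replicate W.toNat (none : Option String))) pvAlphabet.reverse := by
  refine ⟨⟨?_, ?_⟩, ?_, ?_, ?_, ?_⟩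
  · rw [List.length_map, PySem.List.length_pyRange_one]; omega
  · intro row hrow
    obtain ⟨-, -, hrow⟩ := List.mem_map.mp hrow
    rw [← hrow, List.length_replicate]
  · intro c _ s hls
    rw [pvLabelAt_init H W c] at hls
    cases hls
  · intro r hr
    cases hr
  · intro c hc
    cases hc
  · have h26 : (pvAlphabet.reverse : List String).take 26 = pvAlphabet.reverse := by decide
    simp only [List.map_nil]
    rw [show PySem.List.dedup ([] : List (Int × Int)) = [] from rfl]
    rw [List.length_nil, Nat.sub_zero, h26]

theorem pvAltA_main (g : List (List Int)) (H W : Int)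
    (hS : (pvRoots g H W).length ≤ 26) :
    solve_case (H, W, g) = pvSpecGrid g H W := by
  simp only [solve_case]
  have hfold : (PySem.List.pyRange 0 H 1).foldl (fun st i0 =>
      (PySem.List.pyRange 0 W 1).foldl (fun st j0 =>
        ((pvWalkA g H W (H.toNat * W.toNat + 1) st.1 st.2 i0 j0 []).2.1.foldl
          (fun L p => pvSetLabel L p
            (pvWalkA g H W (H.toNat * W.toNat + 1) st.1 st.2 i0 j0 []).1) st.1,
         (pvWalkA g H W (H.toNat * W.toNat + 1) st.1 st.2 i0 j0 []).2.2)) st)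
      ((PySem.List.pyRange 0 H 1).map
        (fun _ => List.replicate W.toNat (none : Option String)), pvAlphabet.reverse) =
      (pvCells H W).foldl (pvStepAF g H W)
        ((PySem.List.pyRange 0 H 1).map
          (fun _ => List.replicate W.toNat (none : Option String)), pvAlphabet.reverse) :=
    pvNestedFold H W (pvStepAF g H W) _
  rw [hfold]
  have hinv := pvFoldA_seg g H W hS (pvCells H W) []
    ((PySem.List.pyRange 0 H 1).map
      (fun _ => List.replicate W.toNat (none : Option String)), pvAlphabet.reverse)
    (by simpa using List.prefix_rfl) (pvInvA_init g H W)
  rw [List.nil_append] at hinv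
  obtain ⟨hsh, hI1, -, hI3, -⟩ := hinv
  set L := ((pvCells H W).foldl (pvStepAF g H W)
    ((PySem.List.pyRange 0 H 1).map
      (fun _ => List.replicate W.toNat (none : Option String)), pvAlphabet.reverse)).1 with hL
  have hcell : ∀ (i j : Nat), i < H.toNat → j < W.toNat →
      pvLabelAt L ((i : Int), (j : Int)) = some (pvLabelOf g H W ((i : Int), (j : Int))) := by
    intro i j hi hj
    have hin : pvInbP H W ((i : Int), (j : Int)) := by
      unfold pvInbP; constructor; · omega
      constructor; · omega
      constructor; · omega
      · omega
    have hmem : ((i : Int), (j : Int)) ∈ pvCells H W := (pvMem_cells H W _).mpr hin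
    have hne := hI3 _ hmem
    cases hls : pvLabelAt L ((i : Int), (j : Int)) with
    | none => exact absurd hls hne
    | some s => rw [(hI1 _ hin s hls).2]
  apply List.ext_getElem
  · rw [List.length_map, hsh.1]
    unfold pvSpecGrid
    rw [List.length_map, PySem.List.length_pyRange_one]
    omega
  · intro i h1 h2
    have hiL : i < L.length := by rw [List.length_map] at h1; exact h1
    have hiH : i < H.toNat := by rw [hsh.1] at hiL; exact hiL
    have hrowlen : L[i].length = W.toNat := hsh.2 L[i] (List.getElem_mem hiL)
    rw [List.getElem_map]
    unfold pvSpecGrid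
    rw [List.getElem_map, PySem.List.getElem_pyRange_one]
    apply List.ext_getElem
    · simp only [List.length_map, PySem.List.length_pyRange_one]
      omega
    · intro j hj1 hj2
      have hjW : j < W.toNat := by
        rw [List.length_map, hrowlen] at hj1; exact hj1
      rw [List.getElem_map, List.getElem_map, PySem.List.getElem_pyRange_one]
      have hread := hcell i j hiH hjW
      rw [pvLabelAt_natCast] at hread
      rw [List.getD_eq_getElem L [] hiL] at hread
      rw [List.getD_eq_getElem L[i] none (by rw [hrowlen]; exact hjW)] at hread
      rw [hread]
      simp

-- ===== VERDICT (by name: the statement is the Claim_ definition above) =====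
theorem solve_case_spec : Claim_equal_solve_case := by
  unfold Claim_equal_solve_case
  intro case _ hpre
  obtain ⟨H, W, g⟩ := case
  unfold Spec_solve_case
  have hS : (pvRoots g H W).length ≤ 26 := by
    unfold Pre_solve_case at hpre
    simp only [] at hpre
    rcases hpre with h | ⟨-, h3⟩
    · have hcells : pvCells H W = [] := by
        rcases h with h | h
        · unfold pvCells
          rw [PySem.List.pyRange_one_eq_nil (a := 0) (b := H) (by omega)]
          rfl
        · unfold pvCells
          rw [PySem.List.pyRange_one_eq_nil (b := W) (by omega)]
          rw [List.flatMap_eq_nil_iff]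
          intro l hl
          rfl
      unfold pvRoots
      rw [hcells]
      simp
    · exact le_trans (pvRoots_card_le g H W) h3
  rw [pvAltA_main g H W hS, pvAltB_main g H W]
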